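-- pv_equiv track=rewrite | github.com/Mao-o/cc-mp-worktools | plugins/sensitive-files-guard/hooks/redact-sensitive-reads/handlers/bash/redirects.py | _consume_redirect_target
-- ===== SOURCE A (Python) =====
-- _DQ_BACKSLASH_ESCAPABLE = frozenset({'$', '`', '"', '\\', '\n'})
--
-- def _consume_redirect_target(command: str, start: int) -> tuple[int, str]:
--     """位置 ``start`` から redirect target (1 つの Bash word) を消費する。
--
--     POSIX sh の word 概念に従い、**quote セクション / bare セクション /
--     backslash escape が 1 つの word 内で mix できる** ことを許容する。
--     word boundary (quote 外の whitespace / operator) に達するまで読み続け、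
--     連結された各セクションの内容 (quote 剥離済み) を結合して返す。
--
--     例:
--     - ``".env".example`` → ``.env.example`` (quote + bare の連結)
--     - ``a"b"c`` → ``abc``
--     - ``".env"*`` → ``.env*``
--     - ``a\\ file`` → ``a file`` (backslash-escaped space は word boundary ではない)
--     - ``".\\env"`` → ``.\\env`` (double-quote 内 ``\\e`` は literal ``\\e``)
--     - ``".env\\$"`` → ``.env$`` (``\\$`` は escape として ``$`` 取り込み)
--
--     Returns:
--         消費した文字数と target 文字列のタプル。
--     """
--     n = len(command)
--     i = start
--     parts: list[str] = []
--
--     while i < n: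
--         c = command[i]
--         # word boundary (quote 外の whitespace / operator)
--         if c in " \t\n|&;<>()":
--             break
--
--         # 開き quote: 対応する閉じ quote までを quote 剥離して取り込む
--         if c in ('"', "'"):
--             q = c
--             i += 1
--             while i < n and command[i] != q:
--                 if q == '"' and command[i] == "\\" and i + 1 < n:
--                     # POSIX sh: double-quote 内では `\X` は X が
--                     # `_DQ_BACKSLASH_ESCAPABLE` に含まれるときのみ escape として
--                     # X を literal で取り込み、backslash は捨てる。それ以外は
--                     # backslash も X も literal として保持。
--                     nxt2 = command[i + 1]
--                     if nxt2 in _DQ_BACKSLASH_ESCAPABLE: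
--                         parts.append(nxt2)
--                         i += 2
--                         continue
--                     parts.append("\\")
--                     parts.append(nxt2)
--                     i += 2
--                     continue
--                 parts.append(command[i])
--                 i += 1
--             if i < n:
--                 i += 1  # closing quote
--             continue
--
--         # quote 外 backslash escape: 次の 1 文字を literal として取り込む
--         if c == "\\" and i + 1 < n:
--             parts.append(command[i + 1])
--             i += 2
--             continue
--
--         parts.append(c)
--         i += 1
--
--     return (i - start, "".join(parts))
-- ===== SOURCE B (Python) =====
-- _DQ_BACKSLASH_ESCAPABLE = frozenset({'$', '`', '"', '\\', '\n'})
--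
-- _BOUNDARY = " \t\n|&;<>()"
--
--
-- def _consume_redirect_target(command: str, start: int) -> tuple[int, str]:
--     """Segment-at-a-time parser: instead of walking character by character, each
--     iteration consumes a whole segment (a quoted section located via str.find, or a
--     maximal bare run) and appends it as one slice."""
--     n = len(command)
--     i = start
--     parts: list[str] = []
--     while i < n:
--         c = command[i]
--         if c in _BOUNDARY:
--             break
--         if c == "'":
--             j = command.find("'", i + 1)
--             if j == -1:
--                 parts.append(command[i + 1:])
--                 i = n
--             else:
--                 parts.append(command[i + 1:j])
--                 i = j + 1
--         elif c == '"':
--             p = i + 1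
--             while True:
--                 jq = command.find('"', p)
--                 jb = command.find('\\', p)
--                 if jb != -1 and (jq == -1 or jb < jq):
--                     # escape (or literal trailing backslash) before the close
--                     if jb + 1 < n:
--                         parts.append(command[p:jb])
--                         nxt = command[jb + 1]
--                         parts.append(nxt if nxt in _DQ_BACKSLASH_ESCAPABLE else '\\' + nxt)
--                         p = jb + 2
--                     else:
--                         parts.append(command[p:])
--                         i = n
--                         break
--                 elif jq == -1:
--                     parts.append(command[p:])
--                     i = n
--                     break
--                 else:
--                     parts.append(command[p:jq])
--                     i = jq + 1
--                     break
--         elif c == '\\':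
--             if i + 1 < n:
--                 parts.append(command[i + 1])
--                 i += 2
--             else:
--                 parts.append('\\')
--                 i += 1
--         else:
--             j = i
--             while j < n and command[j] not in _BOUNDARY and command[j] not in '"\'\\':
--                 j += 1
--             parts.append(command[i:j])
--             i = j
--     return (i - start, "".join(parts))
-- ===== Notes on version B (the rewrite author's own statement) =====
-- stated objective: alternative
-- what changed: A walks the word character by character with nested per-character quote-consuming loops; B parses segment-at-a-time, locating each closing quote or backslash with str.find and appending whole slices, with a boundary scan only for bare runs.
-- outside the precondition, e.g. on _consume_redirect_target('ab', -1): A returns (3, 'bab'), B returns (3, 'b'); on _consume_redirect_target('ab', -5): A raises IndexError, B raises IndexError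
import Mathlib
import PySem

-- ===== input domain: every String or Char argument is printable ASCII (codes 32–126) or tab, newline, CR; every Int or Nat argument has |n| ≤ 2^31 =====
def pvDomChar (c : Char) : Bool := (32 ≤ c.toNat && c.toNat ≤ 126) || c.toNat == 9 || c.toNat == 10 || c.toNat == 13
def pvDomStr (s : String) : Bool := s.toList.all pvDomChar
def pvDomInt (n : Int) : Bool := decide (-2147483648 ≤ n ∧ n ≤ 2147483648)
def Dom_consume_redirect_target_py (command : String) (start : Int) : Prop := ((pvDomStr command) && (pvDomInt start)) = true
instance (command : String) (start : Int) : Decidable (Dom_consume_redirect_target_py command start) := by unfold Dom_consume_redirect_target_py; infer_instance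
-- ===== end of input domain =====

-- B replaces A's character-by-character nested scanning by a segment-at-a-time parser:
-- each quoted section / bare run is located with str.find (PySem.Chars.findFrom) resp. a
-- boundary scan and appended as one slice, instead of appending characters one by one.
-- Both loops carry a Nat fuel (a pure totality guard, always large enough on admitted inputs).

-- ===== PORT A =====
-- _DQ_BACKSLASH_ESCAPABLE = frozenset({'$', '`', '"', '\\', '\n'})
def pvDQEscA (c : Char) : Bool := c == '$' || c == '`' || c == '"' || c == '\\' || c == '\n'
-- command[i] (index valid under Pre_; IndexError inputs are excluded by Pre_)
def pvAtA (cs : List Char) (i : Int) : Char := (PySem.List.pyGet? cs i).getD ' '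
-- c in " \t\n|&;<>()"
def pvBoundaryA (c : Char) : Bool :=
  c == ' ' || c == '\t' || c == '\n' || c == '|' || c == '&' || c == ';' ||
  c == '<' || c == '>' || c == '(' || c == ')'

-- A's inner loop: while i < n and command[i] != q: …
def pvInnerA (cs : List Char) (n : Int) (q : Char) : Nat → Int → List Char → Int × List Char
  | 0, i, parts => (i, parts)
  | fuel + 1, i, parts =>
    if i < n then
      let c := pvAtA cs i
      if c = q then (i, parts)
      else if q = '"' ∧ c = '\\' ∧ i + 1 < n then
        let nxt2 := pvAtA cs (i + 1)
        if pvDQEscA nxt2 then pvInnerA cs n q fuel (i + 2) (parts ++ [nxt2])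
        else pvInnerA cs n q fuel (i + 2) (parts ++ ['\\', nxt2])
      else pvInnerA cs n q fuel (i + 1) (parts ++ [c])
    else (i, parts)

-- A's outer word loop
def pvOuterA (cs : List Char) (n : Int) : Nat → Int → List Char → Int × List Char
  | 0, i, parts => (i, parts)
  | fuel + 1, i, parts =>
    if i < n then
      let c := pvAtA cs i
      if pvBoundaryA c then (i, parts)
      else if c = '"' ∨ c = '\'' then
        let r := pvInnerA cs n c fuel (i + 1) parts
        if r.1 < n then pvOuterA cs n fuel (r.1 + 1) r.2 else pvOuterA cs n fuel r.1 r.2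
      else if c = '\\' ∧ i + 1 < n then
        pvOuterA cs n fuel (i + 2) (parts ++ [pvAtA cs (i + 1)])
      else pvOuterA cs n fuel (i + 1) (parts ++ [c])
    else (i, parts)

def consume_redirect_target_py (command : String) (start : Int) : Int × String :=
  let cs := command.toList
  let n : Int := (cs.length : Int)
  let r := pvOuterA cs n (n - start).toNat start []
  (r.1 - start, String.ofList r.2)

-- ===== PORT B =====
-- command.find(ch, from) — Python's str.find with a start bound
def pvFindB (cs : List Char) (ch : Char) (from_ : Int) : Int :=
  PySem.Chars.findFrom cs [ch] from_ none

-- inner scan of the bare branch: while j < n and command[j] not in _BOUNDARY and command[j] not in '"\'\\': j += 1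
def pvBareSpecialB (c : Char) : Bool :=
  pvBoundaryA c || c == '"' || c == '\'' || c == '\\'
def pvBareEndB (cs : List Char) (n : Int) : Nat → Int → Int
  | 0, j => j
  | fuel + 1, j =>
    if j < n ∧ ¬ (pvBareSpecialB (pvAtA cs j) = true) then pvBareEndB cs n fuel (j + 1) else j

-- the `while True` loop of the double-quote branch (returns the new i and parts)
def pvDqB (cs : List Char) (n : Int) : Nat → Int → List Char → Int × List Char
  | 0, p, parts => (p, parts)
  | fuel + 1, p, parts =>
    let jq := pvFindB cs '"' p
    let jb := pvFindB cs '\\' p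
    if jb ≠ -1 ∧ (jq = -1 ∨ jb < jq) then
      if jb + 1 < n then
        let nxt := pvAtA cs (jb + 1)
        if pvDQEscA nxt then
          pvDqB cs n fuel (jb + 2) (parts ++ PySem.List.slice cs (some p) (some jb) ++ [nxt])
        else
          pvDqB cs n fuel (jb + 2) (parts ++ PySem.List.slice cs (some p) (some jb) ++ ['\\', nxt])
      else (n, parts ++ PySem.List.slice cs (some p) none)
    else if jq = -1 then (n, parts ++ PySem.List.slice cs (some p) none)
    else (jq + 1, parts ++ PySem.List.slice cs (some p) (some jq))

-- B's outer segment loop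
def pvOuterB (cs : List Char) (n : Int) : Nat → Int → List Char → Int × List Char
  | 0, i, parts => (i, parts)
  | fuel + 1, i, parts =>
    if i < n then
      let c := pvAtA cs i
      if pvBoundaryA c then (i, parts)
      else if c = '\'' then
        let j := pvFindB cs '\'' (i + 1)
        if j = -1 then pvOuterB cs n fuel n (parts ++ PySem.List.slice cs (some (i + 1)) none)
        else pvOuterB cs n fuel (j + 1) (parts ++ PySem.List.slice cs (some (i + 1)) (some j))
      else if c = '"' then
        let r := pvDqB cs n (n - i).toNat (i + 1) parts
        pvOuterB cs n fuel r.1 r.2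
      else if c = '\\' then
        if i + 1 < n then pvOuterB cs n fuel (i + 2) (parts ++ [pvAtA cs (i + 1)])
        else pvOuterB cs n fuel (i + 1) (parts ++ ['\\'])
      else
        let j := pvBareEndB cs n (n - i).toNat i
        pvOuterB cs n fuel j (parts ++ PySem.List.slice cs (some i) (some j))
    else (i, parts)

def consume_redirect_target_py_alt (command : String) (start : Int) : Int × String :=
  let cs := command.toList
  let n : Int := (cs.length : Int)
  let r := pvOuterB cs n (n - start).toNat start []
  (r.1 - start, String.ofList r.2)

-- ===== PRECONDITION & SPEC =====
-- Pre_ excludes start < -len(command), where the Python A raises IndexError (and B does too),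
-- and -len(command) ≤ start < 0, where A still returns a value: there Python's accidental
-- negative-index wraparound makes A re-read characters while B's find/slice reads are clamped —
-- both values are artefacts of an input no caller of this word parser can meaningfully pass.
def Pre_consume_redirect_target_py (command : String) (start : Int) : Prop :=
  0 ≤ start
instance (command : String) (start : Int) : Decidable (Pre_consume_redirect_target_py command start) := by
  unfold Pre_consume_redirect_target_py; infer_instance

def pvWitness_consume_redirect_target_py : String × Int := ("\"a b\"'c'd\\ e f", 0)

def Spec_consume_redirect_target_py (command : String) (start : Int) (out : Int × String) : Prop :=
  out = consume_redirect_target_py_alt command start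
instance (command : String) (start : Int) (out : Int × String) : Decidable (Spec_consume_redirect_target_py command start out) := by
  unfold Spec_consume_redirect_target_py; infer_instance

-- ===== CLAIM (what is proved, stated in full; the proofs are below) =====
def Claim_equal_consume_redirect_target_py : Prop :=
  ∀ (command : String) (start : Int), Dom_consume_redirect_target_py command start →
    Pre_consume_redirect_target_py command start →
    Spec_consume_redirect_target_py command start (consume_redirect_target_py command start)

-- ===== LEMMAS AND PROOFS =====

-- pvAtA at a valid non-negative index is the list element
theorem pvAtA_eq (cs : List Char) (k : Int) (h0 : 0 ≤ k) (h : k.toNat < cs.length) :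
    pvAtA cs k = cs[k.toNat]'h := by
  unfold pvAtA
  rw [PySem.List.pyGet?_of_nonneg cs h0, List.getElem?_eq_getElem h]; rfl

theorem pvSlice_nil (cs : List Char) (p : Int) (h0 : 0 ≤ p) :
    PySem.List.slice cs (some p) (some p) = [] := by
  rw [PySem.List.slice_toNat cs h0 h0]
  simp

theorem pvSlice_cons (cs : List Char) (p e : Int) (h0 : 0 ≤ p) (hpe : p < e)
    (hpn : p < (cs.length : Int)) :
    PySem.List.slice cs (some p) (some e) = pvAtA cs p :: PySem.List.slice cs (some (p+1)) (some e) := by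
  have he : (0:Int) ≤ e := by omega
  have hpn' : p.toNat < cs.length := by omega
  rw [PySem.List.slice_toNat cs h0 he, PySem.List.slice_toNat cs (show (0:Int) ≤ p+1 by omega) he,
    pvAtA_eq cs p h0 hpn', List.drop_eq_getElem_cons hpn']
  have h1 : (p+1).toNat = p.toNat + 1 := by omega
  have h2 : e.toNat - p.toNat = (e.toNat - (p+1).toNat) + 1 := by omega
  rw [h2, List.take_succ_cons, h1]

theorem pvSlice_all (cs : List Char) (p : Int) (h0 : 0 ≤ p) :
    PySem.List.slice cs (some p) (some ((cs.length : Int))) = PySem.List.slice cs (some p) none := by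
  rw [PySem.List.slice_toNat cs h0 (by positivity), PySem.List.slice_from cs h0]
  apply List.take_of_length_le
  simp

theorem pvSlice_split (cs : List Char) (p e : Int) (h0 : 0 ≤ p) (hpe : p ≤ e) :
    PySem.List.slice cs (some p) none =
      PySem.List.slice cs (some p) (some e) ++ PySem.List.slice cs (some e) none := by
  have he : (0:Int) ≤ e := by omega
  rw [PySem.List.slice_toNat cs h0 he, PySem.List.slice_from cs h0, PySem.List.slice_from cs he]
  conv_lhs => rw [← List.take_append_drop (e.toNat - p.toNat) (cs.drop p.toNat)]
  rw [List.drop_drop]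
  congr 2
  omega

theorem pvSlice_last (cs : List Char) (h : cs ≠ []) :
    PySem.List.slice cs (some ((cs.length : Int) - 1)) none = [pvAtA cs ((cs.length : Int) - 1)] := by
  have hlen : 0 < cs.length := List.length_pos_of_ne_nil h
  have h0 : (0:Int) ≤ (cs.length : Int) - 1 := by omega
  have ht : ((cs.length : Int) - 1).toNat = cs.length - 1 := by omega
  have hlt : cs.length - 1 < cs.length := by omega
  rw [PySem.List.slice_from cs h0, ht, pvAtA_eq cs _ h0 (by omega),
    List.drop_eq_getElem_cons hlt, List.drop_of_length_le (by omega)]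
  simp only [ht]

-- str.find(ch, p): characterisation as first occurrence at or after p
theorem pvSinglePrefixIff (l : List Char) (ch : Char) : [ch] <+: l ↔ l.head? = some ch := by
  cases l with
  | nil => simp
  | cons a t => simp [List.cons_prefix_cons, eq_comm]

theorem pvSingleInfixIff (l : List Char) (ch : Char) : [ch] <:+: l ↔ ch ∈ l := by
  constructor
  · rintro ⟨s, t, rfl⟩; simp
  · intro h
    obtain ⟨s, t, rfl⟩ := List.append_of_mem h
    exact ⟨s, t, by simp⟩

theorem pvFindB_spec (cs : List Char) (ch : Char) (p : Int) (h0 : 0 ≤ p) (hp : p ≤ (cs.length : Int)) :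
    (pvFindB cs ch p = -1 ∧ ∀ k : Int, p ≤ k → k < (cs.length : Int) → pvAtA cs k ≠ ch) ∨
    (p ≤ pvFindB cs ch p ∧ pvFindB cs ch p < (cs.length : Int) ∧ pvAtA cs (pvFindB cs ch p) = ch ∧
      ∀ k : Int, p ≤ k → k < pvFindB cs ch p → pvAtA cs k ≠ ch) := by
  have hk : p.toNat ≤ cs.length := by omega
  have hcast : p = (p.toNat : Int) := by omega
  unfold pvFindB
  rw [hcast, PySem.Chars.findFrom_natCast cs [ch] p.toNat hk]
  by_cases hf : PySem.Chars.find (cs.drop p.toNat) [ch] = -1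
  · left
    rw [if_pos hf]
    refine ⟨rfl, ?_⟩
    intro k hk1 hk2 hEq
    have hmem : ch ∈ cs.drop p.toNat := by
      have hkl : k.toNat < cs.length := by omega
      have : cs[k.toNat]? = some ch := by
        rw [List.getElem?_eq_getElem hkl]
        rw [pvAtA_eq cs k (by omega) hkl] at hEq
        exact congrArg some hEq
      have hpre : [ch] <+: cs.drop k.toNat := by
        rw [pvSinglePrefixIff, List.head?_drop]; exact this
      have hinf : [ch] <:+: cs.drop p.toNat := by
        have hdd : cs.drop k.toNat = (cs.drop p.toNat).drop (k.toNat - p.toNat) := by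
          rw [List.drop_drop]; congr 1; omega
        rw [hdd] at hpre
        exact hpre.isInfix.trans (List.drop_suffix _ _).isInfix
      rw [pvSingleInfixIff] at hinf; exact hinf
    rw [PySem.Chars.find_eq_neg_one_iff, pvSingleInfixIff] at hf
    exact hf hmem
  · right
    rw [if_neg hf]
    have hge : 0 ≤ PySem.Chars.find (cs.drop p.toNat) [ch] := by
      have := PySem.Chars.neg_one_le_find (cs.drop p.toNat) [ch]; omega
    obtain ⟨hpre, hmin⟩ := PySem.Chars.find_spec hge
    set f := PySem.Chars.find (cs.drop p.toNat) [ch] with hfdef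
    rw [List.drop_drop, pvSinglePrefixIff, List.head?_drop] at hpre
    have hlt : p.toNat + f.toNat < cs.length := by
      by_contra hc
      rw [List.getElem?_eq_none (by omega)] at hpre
      simp at hpre
    have hElem : cs[p.toNat + f.toNat]'hlt = ch := by
      rw [List.getElem?_eq_getElem hlt] at hpre
      exact Option.some.inj hpre
    refine ⟨by omega, by omega, ?_, ?_⟩
    · rw [pvAtA_eq cs _ (by omega) (show ((p.toNat:Int) + f).toNat < cs.length by omega)]
      have : ((p.toNat:Int) + f).toNat = p.toNat + f.toNat := by omega
      simp only [this]; exact hElem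
    · intro k hk1 hk2 hEq
      have hkl : k.toNat < cs.length := by omega
      have hdk : (cs.drop p.toNat).drop (k.toNat - p.toNat) = cs.drop k.toNat := by
        rw [List.drop_drop]; congr 1; omega
      have : ¬ [ch] <+: (cs.drop p.toNat).drop (k.toNat - p.toNat) := hmin _ (by omega)
      rw [hdk, pvSinglePrefixIff, List.head?_drop, List.getElem?_eq_getElem hkl] at this
      rw [pvAtA_eq cs k (by omega) hkl] at hEq
      exact this (congrArg some hEq)


-- stop lemmas
theorem pvInnerA_stop (cs : List Char) (n : Int) (q : Char) (fuel : Nat) (i : Int)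
    (parts : List Char) (h : ¬ i < n) : pvInnerA cs n q fuel i parts = (i, parts) := by
  cases fuel <;> simp [pvInnerA, h]

theorem pvOuterA_stop (cs : List Char) (n : Int) (fuel : Nat) (i : Int)
    (parts : List Char) (h : ¬ i < n) : pvOuterA cs n fuel i parts = (i, parts) := by
  cases fuel <;> simp [pvOuterA, h]

theorem pvOuterB_stop (cs : List Char) (n : Int) (fuel : Nat) (i : Int)
    (parts : List Char) (h : ¬ i < n) : pvOuterB cs n fuel i parts = (i, parts) := by
  cases fuel <;> simp [pvOuterB, h]

-- the inner loop never moves i backwards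
theorem pvInnerA_fst_ge (cs : List Char) (n : Int) (q : Char) :
    ∀ (fuel : Nat) (i : Int) (parts : List Char), i ≤ (pvInnerA cs n q fuel i parts).1 := by
  intro fuel
  induction fuel with
  | zero => intro i parts; simp [pvInnerA]
  | succ fuel ih =>
      intro i parts
      by_cases hin : i < n
      · rw [pvInnerA]
        simp only [if_pos hin]
        by_cases hq : pvAtA cs i = q
        · simp [hq]
        · rw [if_neg hq]
          by_cases hbs : q = '"' ∧ pvAtA cs i = '\\' ∧ i + 1 < n
          · rw [if_pos hbs]
            by_cases hesc : pvDQEscA (pvAtA cs (i + 1)) = true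
            · rw [if_pos hesc]
              have := ih (i + 2) (parts ++ [pvAtA cs (i + 1)]); omega
            · rw [if_neg hesc]
              have := ih (i + 2) (parts ++ ['\\', pvAtA cs (i + 1)]); omega
          · rw [if_neg hbs]
            have := ih (i + 1) (parts ++ [pvAtA cs i]); omega
      · rw [pvInnerA_stop cs n q _ i parts hin]

-- fuel irrelevance for A's inner loop
theorem pvInnerA_irrel (cs : List Char) (n : Int) (q : Char) :
    ∀ (f1 f2 : Nat) (i : Int) (parts : List Char),
      (n - i).toNat ≤ f1 → (n - i).toNat ≤ f2 →
      pvInnerA cs n q f1 i parts = pvInnerA cs n q f2 i parts := by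
  intro f1
  induction f1 with
  | zero =>
      intro f2 i parts h1 h2
      have hin : ¬ i < n := by omega
      rw [pvInnerA_stop cs n q _ i parts hin, pvInnerA_stop cs n q _ i parts hin]
  | succ f1 ih =>
      intro f2 i parts h1 h2
      by_cases hin : i < n
      · obtain ⟨f2', rfl⟩ : ∃ f2', f2 = f2' + 1 := ⟨f2 - 1, by omega⟩
        rw [pvInnerA, pvInnerA]
        simp only [if_pos hin]
        by_cases hq : pvAtA cs i = q
        · simp [hq]
        · rw [if_neg hq, if_neg hq]
          by_cases hbs : q = '"' ∧ pvAtA cs i = '\\' ∧ i + 1 < n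
          · rw [if_pos hbs, if_pos hbs]
            by_cases hesc : pvDQEscA (pvAtA cs (i + 1)) = true
            · rw [if_pos hesc, if_pos hesc]
              exact ih f2' (i + 2) (parts ++ [pvAtA cs (i + 1)]) (by omega) (by omega)
            · rw [if_neg hesc, if_neg hesc]
              exact ih f2' (i + 2) (parts ++ ['\\', pvAtA cs (i + 1)]) (by omega) (by omega)
          · rw [if_neg hbs, if_neg hbs]
            exact ih f2' (i + 1) (parts ++ [pvAtA cs i]) (by omega) (by omega)
      · rw [pvInnerA_stop cs n q _ i parts hin, pvInnerA_stop cs n q _ i parts hin]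

-- fuel irrelevance for A's outer loop
theorem pvOuterA_irrel (cs : List Char) (n : Int) :
    ∀ (f1 f2 : Nat) (i : Int) (parts : List Char),
      (n - i).toNat ≤ f1 → (n - i).toNat ≤ f2 →
      pvOuterA cs n f1 i parts = pvOuterA cs n f2 i parts := by
  intro f1
  induction f1 with
  | zero =>
      intro f2 i parts h1 h2
      have hin : ¬ i < n := by omega
      rw [pvOuterA_stop cs n _ i parts hin, pvOuterA_stop cs n _ i parts hin]
  | succ f1 ih =>
      intro f2 i parts h1 h2
      by_cases hin : i < n
      · obtain ⟨f2', rfl⟩ : ∃ f2', f2 = f2' + 1 := ⟨f2 - 1, by omega⟩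
        rw [pvOuterA, pvOuterA]
        simp only [if_pos hin]
        by_cases hb : pvBoundaryA (pvAtA cs i) = true
        · rw [if_pos hb, if_pos hb]
        · rw [if_neg hb, if_neg hb]
          by_cases hqc : pvAtA cs i = '"' ∨ pvAtA cs i = '\''
          · rw [if_pos hqc, if_pos hqc]
            have hinner := pvInnerA_irrel cs n (pvAtA cs i) f1 f2' (i + 1) parts (by omega) (by omega)
            rw [hinner]
            have hge := pvInnerA_fst_ge cs n (pvAtA cs i) f2' (i + 1) parts
            by_cases h2n : (pvInnerA cs n (pvAtA cs i) f2' (i + 1) parts).1 < n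
            · rw [if_pos h2n, if_pos h2n]
              exact ih f2' _ _ (by omega) (by omega)
            · rw [if_neg h2n, if_neg h2n]
              exact ih f2' _ _ (by omega) (by omega)
          · rw [if_neg hqc, if_neg hqc]
            by_cases hbs : pvAtA cs i = '\\' ∧ i + 1 < n
            · rw [if_pos hbs, if_pos hbs]
              exact ih f2' (i + 2) (parts ++ [pvAtA cs (i + 1)]) (by omega) (by omega)
            · rw [if_neg hbs, if_neg hbs]
              exact ih f2' (i + 1) (parts ++ [pvAtA cs i]) (by omega) (by omega)
      · rw [pvOuterA_stop cs n _ i parts hin, pvOuterA_stop cs n _ i parts hin]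

-- a run of ordinary characters: A's inner loop appends it, one character per step,
-- and that equals appending the slice at once
theorem pvInnerA_run (cs : List Char) (q : Char) :
    ∀ (d : Nat) (p e : Int) (parts : List Char) (f1 f2 : Nat),
      (e - p).toNat = d → 0 ≤ p → p ≤ e → e ≤ (cs.length : Int) →
      (∀ k : Int, p ≤ k → k < e → pvAtA cs k ≠ q ∧ (q = '"' → pvAtA cs k ≠ '\\')) →
      ((cs.length : Int) - p).toNat ≤ f1 → ((cs.length : Int) - e).toNat ≤ f2 →
      pvInnerA cs (cs.length : Int) q f1 p parts =
        pvInnerA cs (cs.length : Int) q f2 e (parts ++ PySem.List.slice cs (some p) (some e)) := by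
  intro d
  induction d with
  | zero =>
      intro p e parts f1 f2 hd h0 hpe hen hrun hf1 hf2
      have hep : e = p := by omega
      rw [hep, pvSlice_nil cs p h0, List.append_nil]
      rw [hep] at hf2
      exact pvInnerA_irrel cs _ q f1 f2 p parts hf1 hf2
  | succ d ih =>
      intro p e parts f1 f2 hd h0 hpe hen hrun hf1 hf2
      have hpn : p < (cs.length : Int) := by omega
      obtain ⟨f1', rfl⟩ : ∃ f1', f1 = f1' + 1 := ⟨f1 - 1, by omega⟩
      obtain ⟨hq, hbs⟩ := hrun p (le_refl p) (by omega)
      rw [pvInnerA]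
      simp only [if_pos hpn]
      rw [if_neg hq, if_neg (by intro h; exact hbs h.1 h.2.1)]
      rw [ih (p + 1) e (parts ++ [pvAtA cs p]) f1' f2 (by omega) (by omega) (by omega) hen
        (fun k hk1 hk2 => hrun k (by omega) hk2) (by omega) hf2]
      rw [pvSlice_cons cs p e h0 (by omega) hpn, List.append_assoc]
      rfl

-- a run of ordinary (non-special) characters: A's outer loop appends it char by char
theorem pvOuterA_run (cs : List Char) :
    ∀ (d : Nat) (i e : Int) (parts : List Char) (f1 f2 : Nat),
      (e - i).toNat = d → 0 ≤ i → i ≤ e → e ≤ (cs.length : Int) →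
      (∀ k : Int, i ≤ k → k < e → pvBareSpecialB (pvAtA cs k) = false) →
      ((cs.length : Int) - i).toNat ≤ f1 → ((cs.length : Int) - e).toNat ≤ f2 →
      pvOuterA cs (cs.length : Int) f1 i parts =
        pvOuterA cs (cs.length : Int) f2 e (parts ++ PySem.List.slice cs (some i) (some e)) := by
  intro d
  induction d with
  | zero =>
      intro i e parts f1 f2 hd h0 hpe hen hrun hf1 hf2
      have hep : e = i := by omega
      rw [hep, pvSlice_nil cs i h0, List.append_nil]
      rw [hep] at hf2
      exact pvOuterA_irrel cs _ f1 f2 i parts hf1 hf2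
  | succ d ih =>
      intro i e parts f1 f2 hd h0 hpe hen hrun hf1 hf2
      have hpn : i < (cs.length : Int) := by omega
      obtain ⟨f1', rfl⟩ : ∃ f1', f1 = f1' + 1 := ⟨f1 - 1, by omega⟩
      have hsp := hrun i (le_refl i) (by omega)
      have hnb : ¬ pvBoundaryA (pvAtA cs i) = true := by
        simp only [pvBareSpecialB, Bool.or_eq_false_iff] at hsp
        simp [hsp.1.1.1]
      have hnq : ¬ (pvAtA cs i = '"' ∨ pvAtA cs i = '\'') := by
        simp only [pvBareSpecialB, Bool.or_eq_false_iff, beq_eq_false_iff_ne] at hsp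
        push Not
        exact ⟨hsp.1.1.2, hsp.1.2⟩
      have hnbs : ¬ (pvAtA cs i = '\\' ∧ i + 1 < (cs.length : Int)) := by
        simp only [pvBareSpecialB, Bool.or_eq_false_iff, beq_eq_false_iff_ne] at hsp
        intro h; exact hsp.2 h.1
      rw [pvOuterA]
      simp only [if_pos hpn]
      rw [if_neg hnb, if_neg hnq, if_neg hnbs]
      rw [ih (i + 1) e (parts ++ [pvAtA cs i]) f1' f2 (by omega) (by omega) (by omega) hen
        (fun k hk1 hk2 => hrun k (by omega) hk2) (by omega) hf2]
      rw [pvSlice_cons cs i e h0 (by omega) hpn, List.append_assoc]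
      rfl

-- pvBareEndB: bounds and characterisation
theorem pvBareEndB_spec (cs : List Char) :
    ∀ (fuel : Nat) (j : Int), 0 ≤ j → j ≤ (cs.length : Int) → ((cs.length : Int) - j).toNat ≤ fuel →
      j ≤ pvBareEndB cs (cs.length : Int) fuel j ∧
      pvBareEndB cs (cs.length : Int) fuel j ≤ (cs.length : Int) ∧
      (∀ k : Int, j ≤ k → k < pvBareEndB cs (cs.length : Int) fuel j → pvBareSpecialB (pvAtA cs k) = false) ∧
      (pvBareEndB cs (cs.length : Int) fuel j = (cs.length : Int) ∨
        pvBareSpecialB (pvAtA cs (pvBareEndB cs (cs.length : Int) fuel j)) = true) := by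
  intro fuel
  induction fuel with
  | zero =>
      intro j h0 hjn hf
      have hjn' : j = (cs.length : Int) := by omega
      simp only [pvBareEndB]
      exact ⟨le_refl j, hjn, fun k hk1 hk2 => absurd (lt_of_le_of_lt hk1 hk2) (lt_irrefl j), Or.inl hjn'⟩
  | succ fuel ih =>
      intro j h0 hjn hf
      rw [pvBareEndB]
      by_cases hc : j < (cs.length : Int) ∧ ¬ (pvBareSpecialB (pvAtA cs j) = true)
      · rw [if_pos hc]
        obtain ⟨ih1, ih2, ih3, ih4⟩ := ih (j + 1) (by omega) (by omega) (by omega)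
        refine ⟨by omega, ih2, ?_, ih4⟩
        intro k hk1 hk2
        by_cases hkj : k = j
        · rw [hkj]; simpa using hc.2
        · exact ih3 k (by omega) hk2
      · rw [if_neg hc]
        refine ⟨le_refl j, hjn, fun k hk1 hk2 => absurd (lt_of_le_of_lt hk1 hk2) (lt_irrefl j), ?_⟩
        by_cases hjlt : j < (cs.length : Int)
        · right
          by_contra hsp
          exact hc ⟨hjlt, by simpa using hsp⟩
        · left; omega

-- at the end of the string, B's double-quote loop returns immediately
theorem pvDqB_end (cs : List Char) (fB : Nat) (parts : List Char) :
    pvDqB cs (cs.length : Int) fB (cs.length : Int) parts = ((cs.length : Int), parts) := by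
  cases fB with
  | zero => rfl
  | succ fB =>
      have hq := pvFindB_spec cs '"' (cs.length : Int) (by positivity) (le_refl _)
      have hb := pvFindB_spec cs '\\' (cs.length : Int) (by positivity) (le_refl _)
      have hq1 : pvFindB cs '"' (cs.length : Int) = -1 := by
        rcases hq with ⟨h, _⟩ | ⟨h1, h2, _⟩
        · exact h
        · omega
      have hb1 : pvFindB cs '\\' (cs.length : Int) = -1 := by
        rcases hb with ⟨h, _⟩ | ⟨h1, h2, _⟩
        · exact h
        · omega
      rw [pvDqB]
      rw [if_neg (by simp [hb1]), if_pos hq1]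
      rw [PySem.List.slice_from cs (by positivity)]
      simp

-- the double-quote section: A's char loop (plus the closing-quote skip) equals B's find/slice loop
theorem pvDq_main (cs : List Char) :
    ∀ (m : Nat) (p : Int) (parts : List Char) (fA fB : Nat),
      0 ≤ p → p ≤ (cs.length : Int) →
      ((cs.length : Int) - p).toNat ≤ m → ((cs.length : Int) - p).toNat ≤ fA → ((cs.length : Int) - p).toNat ≤ fB →
      (let r := pvInnerA cs (cs.length : Int) '"' fA p parts;
        if r.1 < (cs.length : Int) then (r.1 + 1, r.2) else r) = pvDqB cs (cs.length : Int) fB p parts := by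
  intro m
  induction m with
  | zero =>
      intro p parts fA fB h0 hpn hm hfA hfB
      have hpe : p = (cs.length : Int) := by omega
      rw [hpe, pvInnerA_stop cs _ '"' fA _ parts (by omega)]
      simp only []
      rw [if_neg (by omega), pvDqB_end]
  | succ m ih =>
      intro p parts fA fB h0 hpn hm hfA hfB
      by_cases hplt : p < (cs.length : Int)
      · obtain ⟨fA', rfl⟩ : ∃ f, fA = f + 1 := ⟨fA - 1, by omega⟩
        obtain ⟨fB', rfl⟩ : ∃ f, fB = f + 1 := ⟨fB - 1, by omega⟩
        have specq := pvFindB_spec cs '"' p h0 (by omega)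
        have specb := pvFindB_spec cs '\\' p h0 (by omega)
        rw [pvDqB]
        by_cases hcond : pvFindB cs '\\' p ≠ -1 ∧ (pvFindB cs '"' p = -1 ∨ pvFindB cs '\\' p < pvFindB cs '"' p)
        · -- a backslash comes first
          rcases specb with ⟨hbeq, _⟩ | ⟨hb1, hb2, hb3, hb4⟩
          · exact absurd hbeq hcond.1
          set jb := pvFindB cs '\\' p with hjbdef
          have hrun : ∀ k : Int, p ≤ k → k < jb →
              pvAtA cs k ≠ '"' ∧ ('"' = '"' → pvAtA cs k ≠ '\\') := by
            intro k hk1 hk2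
            refine ⟨?_, fun _ => hb4 k hk1 hk2⟩
            rcases specq with ⟨_, hqall⟩ | ⟨hq1, hq2, hq3, hq4⟩
            · exact hqall k hk1 (by omega)
            · rcases hcond.2 with hqeq | hlt
              · rw [hqeq] at hq1; omega
              · exact hq4 k hk1 (by omega)
          rw [if_pos hcond]
          rw [pvInnerA_run cs '"' (jb - p).toNat p jb parts (fA' + 1) (fA' + 1) rfl h0 hb1
            (by omega) hrun hfA (by omega)]
          rw [pvInnerA]
          simp only [if_pos hb2, hb3]
          rw [if_neg (show ¬ ('\\' : Char) = '"' by decide)]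
          by_cases hjb1 : jb + 1 < (cs.length : Int)
          · rw [if_pos (show True ∧ True ∧ jb + 1 < (cs.length : Int) from ⟨trivial, trivial, hjb1⟩),
              if_pos hjb1]
            by_cases hesc : pvDQEscA (pvAtA cs (jb + 1)) = true
            · rw [if_pos hesc, if_pos hesc]
              exact ih (jb + 2) _ fA' fB' (by omega) (by omega) (by omega) (by omega) (by omega)
            · rw [if_neg hesc, if_neg hesc]
              exact ih (jb + 2) _ fA' fB' (by omega) (by omega) (by omega) (by omega) (by omega)
          · rw [if_neg (show ¬ (True ∧ True ∧ jb + 1 < (cs.length : Int)) from fun h => hjb1 h.2.2),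
              if_neg hjb1]
            rw [pvInnerA_stop cs _ '"' fA' (jb + 1) _ (by omega)]
            simp only []
            rw [if_neg (by omega)]
            have hjbn : jb = (cs.length : Int) - 1 := by omega
            have hcs : cs ≠ [] := by
              intro hnil; rw [hnil] at hplt; simp at hplt; omega
            have hsplit := pvSlice_split cs p jb h0 hb1
            have hlast : PySem.List.slice cs (some jb) none = ['\\'] := by
              rw [hjbn, pvSlice_last cs hcs, ← hjbn, hb3]
            rw [hsplit, hlast, ← List.append_assoc]
            congr 1
            omega
        · -- no backslash before the close (or none at all)
          rw [if_neg hcond]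
          by_cases hjq : pvFindB cs '"' p = -1
          · -- no closing quote either: consume to end of string
            rw [if_pos hjq]
            rcases specq with ⟨_, hqall⟩ | ⟨hq1, _, _, _⟩
            · have hball : ∀ k : Int, p ≤ k → k < (cs.length : Int) → pvAtA cs k ≠ '\\' := by
                rcases specb with ⟨_, hb⟩ | ⟨hb1, hb2, hb3, _⟩
                · exact fun k h1 h2 => hb k h1 h2
                · exfalso
                  exact hcond ⟨by omega, Or.inl hjq⟩
              have hrun : ∀ k : Int, p ≤ k → k < (cs.length : Int) →
                  pvAtA cs k ≠ '"' ∧ ('"' = '"' → pvAtA cs k ≠ '\\') :=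
                fun k h1 h2 => ⟨hqall k h1 h2, fun _ => hball k h1 h2⟩
              rw [pvInnerA_run cs '"' ((cs.length : Int) - p).toNat p (cs.length : Int) parts
                (fA' + 1) (fA' + 1) rfl h0 (by omega) (le_refl _) hrun hfA (by omega)]
              rw [pvInnerA_stop cs _ '"' (fA' + 1) _ _ (by omega)]
              simp only []
              rw [if_neg (by omega), pvSlice_all cs p h0]
            · rw [hjq] at hq1; omega
          · rw [if_neg hjq]
            rcases specq with ⟨hqeq, _⟩ | ⟨hq1, hq2, hq3, hq4⟩
            · exact absurd hqeq hjq
            set jq := pvFindB cs '"' p with hjqdef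
            have hrun : ∀ k : Int, p ≤ k → k < jq →
                pvAtA cs k ≠ '"' ∧ ('"' = '"' → pvAtA cs k ≠ '\\') := by
              intro k hk1 hk2
              refine ⟨hq4 k hk1 hk2, fun _ => ?_⟩
              rcases specb with ⟨_, hball⟩ | ⟨hb1, hb2, hb3, hb4⟩
              · exact hball k hk1 (by omega)
              · have : ¬ pvFindB cs '\\' p < jq := fun hlt => hcond ⟨by omega, Or.inr hlt⟩
                exact hb4 k hk1 (by omega)
            rw [pvInnerA_run cs '"' (jq - p).toNat p jq parts (fA' + 1) (fA' + 1) rfl h0 hq1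
              (by omega) hrun hfA (by omega)]
            rw [pvInnerA]
            simp only [if_pos hq2, hq3, if_true]
      · -- p = n : both sides stop
        have hpe : p = (cs.length : Int) := by omega
        rw [hpe, pvInnerA_stop cs _ '"' fA _ parts (by omega)]
        simp only []
        rw [if_neg (by omega), pvDqB_end]

-- main loop correspondence
theorem pvOuter_main (cs : List Char) :
    ∀ (m : Nat) (i : Int) (parts : List Char) (fA fB : Nat),
      0 ≤ i → ((cs.length : Int) - i).toNat ≤ m →
      ((cs.length : Int) - i).toNat ≤ fA → ((cs.length : Int) - i).toNat ≤ fB →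
      pvOuterA cs (cs.length : Int) fA i parts = pvOuterB cs (cs.length : Int) fB i parts := by
  intro m
  induction m with
  | zero =>
      intro i parts fA fB h0 hm hfA hfB
      have hin : ¬ i < (cs.length : Int) := by omega
      rw [pvOuterA_stop cs _ fA i parts hin, pvOuterB_stop cs _ fB i parts hin]
  | succ m ih =>
      intro i parts fA fB h0 hm hfA hfB
      by_cases hin : i < (cs.length : Int)
      · obtain ⟨fA', rfl⟩ : ∃ f, fA = f + 1 := ⟨fA - 1, by omega⟩
        obtain ⟨fB', rfl⟩ : ∃ f, fB = f + 1 := ⟨fB - 1, by omega⟩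
        by_cases hb : pvBoundaryA (pvAtA cs i) = true
        · rw [pvOuterA, pvOuterB]
          simp only [if_pos hin]
          rw [if_pos hb, if_pos hb]
        · by_cases hsq : pvAtA cs i = '\''
          · -- single-quote section
            rw [pvOuterA, pvOuterB]
            simp only [if_pos hin]
            rw [if_neg hb, if_neg hb, if_pos (Or.inr hsq), if_pos hsq, hsq]
            have spec := pvFindB_spec cs '\'' (i + 1) (by omega) (by omega)
            rcases spec with ⟨hf1, hall⟩ | ⟨hf1, hf2, hf3, hf4⟩
            · -- unclosed quote: to end of string
              rw [if_pos hf1]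
              have hrun : ∀ k : Int, i + 1 ≤ k → k < (cs.length : Int) →
                  pvAtA cs k ≠ '\'' ∧ ('\'' = '"' → pvAtA cs k ≠ '\\') :=
                fun k h1 h2 => ⟨hall k h1 h2, fun h => absurd h (by decide)⟩
              rw [pvInnerA_run cs '\'' ((cs.length : Int) - (i + 1)).toNat (i + 1) (cs.length : Int)
                parts fA' fA' rfl (by omega) (by omega) (le_refl _) hrun (by omega) (by omega)]
              rw [pvInnerA_stop cs _ '\'' fA' _ _ (by omega)]
              simp only []
              rw [if_neg (by omega)]
              rw [pvOuterA_stop cs _ fA' _ _ (by omega), pvOuterB_stop cs _ fB' _ _ (by omega)]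
              rw [pvSlice_all cs (i + 1) (by omega)]
            · -- closing quote at hf := pvFindB cs '\'' (i+1)
              obtain ⟨fA'', rfl⟩ : ∃ f, fA' = f + 1 := ⟨fA' - 1, by omega⟩
              rw [if_neg (show ¬ pvFindB cs '\'' (i + 1) = -1 by omega)]
              have hrun : ∀ k : Int, i + 1 ≤ k → k < pvFindB cs '\'' (i + 1) →
                  pvAtA cs k ≠ '\'' ∧ ('\'' = '"' → pvAtA cs k ≠ '\\') :=
                fun k h1 h2 => ⟨hf4 k h1 h2, fun h => absurd h (by decide)⟩
              rw [pvInnerA_run cs '\'' (pvFindB cs '\'' (i + 1) - (i + 1)).toNat (i + 1)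
                (pvFindB cs '\'' (i + 1)) parts (fA'' + 1) (fA'' + 1) rfl (by omega) hf1 (by omega)
                hrun (by omega) (by omega)]
              rw [pvInnerA]
              simp only [if_pos hf2, hf3, if_true]
              exact ih _ _ (fA'' + 1) fB' (by omega) (by omega) (by omega) (by omega)
          · by_cases hdq : pvAtA cs i = '"'
            · -- double-quote section
              rw [pvOuterA, pvOuterB]
              simp only [if_pos hin]
              rw [if_neg hb, if_neg hb, if_pos (Or.inl hdq), if_neg hsq, if_pos hdq, hdq]
              have hmain := pvDq_main cs ((cs.length : Int) - (i + 1)).toNat (i + 1) parts fA'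
                ((cs.length : Int) - i).toNat (by omega) (by omega) (le_refl _) (by omega) (by omega)
              have hge := pvInnerA_fst_ge cs (cs.length : Int) '"' fA' (i + 1) parts
              by_cases hr : (pvInnerA cs (cs.length : Int) '"' fA' (i + 1) parts).1 < (cs.length : Int)
              · rw [if_pos hr]
                rw [if_pos hr] at hmain
                rw [← hmain]
                exact ih _ _ fA' fB' (by omega) (by omega) (by omega) (by omega)
              · rw [if_neg hr]
                rw [if_neg hr] at hmain
                rw [← hmain]
                exact ih _ _ fA' fB' (by omega) (by omega) (by omega) (by omega)
            · by_cases hbs : pvAtA cs i = '\\'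
              · -- backslash escape
                rw [pvOuterA, pvOuterB]
                simp only [if_pos hin]
                rw [if_neg hb, if_neg hb, if_neg (by rw [hbs]; decide), if_neg hsq, if_neg hdq,
                  if_pos hbs]
                by_cases h1 : i + 1 < (cs.length : Int)
                · rw [if_pos ⟨hbs, h1⟩, if_pos h1]
                  exact ih _ _ fA' fB' (by omega) (by omega) (by omega) (by omega)
                · rw [if_neg (fun h => h1 h.2), if_neg h1, hbs]
                  exact ih _ _ fA' fB' (by omega) (by omega) (by omega) (by omega)
              · -- bare run
                have hspec : pvBareSpecialB (pvAtA cs i) = false := by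
                  simp only [pvBareSpecialB, Bool.or_eq_false_iff, beq_eq_false_iff_ne]
                  exact ⟨⟨⟨by simpa using hb, hdq⟩, hsq⟩, hbs⟩
                obtain ⟨he1, he2, he3, he4⟩ := pvBareEndB_spec cs ((cs.length : Int) - i).toNat i
                  h0 (by omega) (le_refl _)
                set j := pvBareEndB cs (cs.length : Int) ((cs.length : Int) - i).toNat i with hjdef
                have hjgt : i < j := by
                  rcases lt_or_eq_of_le he1 with h | h
                  · exact h
                  · exfalso
                    rcases he4 with h4 | h4
                    · omega
                    · rw [← h] at h4
                      rw [hspec] at h4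
                      exact Bool.false_ne_true h4
                rw [pvOuterA_run cs (j - i).toNat i j parts (fA' + 1) (fA' + 1) rfl h0 (by omega)
                  he2 he3 hfA (by omega)]
                rw [pvOuterB]
                simp only [if_pos hin]
                rw [if_neg hb, if_neg hsq, if_neg hdq, if_neg hbs]
                exact ih _ _ (fA' + 1) fB' (by omega) (by omega) (by omega) (by omega)
      · rw [pvOuterA_stop cs _ _ i parts hin, pvOuterB_stop cs _ _ i parts hin]

-- ===== VERDICT (by name: the statement is the Claim_ definition above) =====
theorem consume_redirect_target_py_spec : Claim_equal_consume_redirect_target_py := by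
  intro command start _ hpre
  unfold Spec_consume_redirect_target_py
  simp only [consume_redirect_target_py, consume_redirect_target_py_alt]
  rw [pvOuter_main command.toList ((command.toList.length : Int) - start).toNat start [] _ _ hpre
      (le_refl _) (le_refl _) (le_refl _)]
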